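-- pv_equiv track=rewrite | github.com/Yerioh/Today_I_Learned | 알고리즘 문제 풀기/im/im07.py | othello
-- ===== SOURCE A (Python) =====
-- def othello(arr, r, c, p):
--     arr[r][c] = p
--     # 각 방향 검사
--     dl = [(0, -1), (0, 1), (-1, 0), (1, 0), (-1, -1), (1, -1), (-1, 1), (1, 1)]
--     for dr, dc in dl:
--         stack = []  # 상대 돌 저장
--         vr, vc = r, c
--         while True:
--             nr, nc = vr + dr, vc + dc
--             # 종료조건 1: 인덱스 범위 확인, 다음 돌이 빈공간이면
--             if not(0 <= nr < len(arr)) or not(0 <= nc < len(arr)) or arr[nr][nc] == 0: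
--                 break
--             # 내 돌을 만나면
--             if arr[nr][nc] == p:
--                 for i, j in stack:
--                     arr[i][j] = p
--                 break
--             # 종료가 되지 않았다면
--             vr, vc = nr, nc
--             stack.append((vr, vc))
--     return arr
-- ===== SOURCE B (Python) =====
-- def othello(arr, r, c, p):
--     # Functional rebuild: place the piece on a copy, then every cell decides for
--     # itself (line of sight back to the placed piece) whether it was captured.
--     # A mutates arr in place; B leaves arr untouched and returns a new board.
--     n = len(arr)
--     board = [row[:] for row in arr]
--     board[r][c] = p
--
--     def sign(x):
--         return (x > 0) - (x < 0)
--
--     def captured(i, j):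
--         di, dj = i - r, j - c
--         d = max(abs(di), abs(dj))
--         if d == 0 or (di != 0 and dj != 0 and abs(di) != abs(dj)):
--             return False  # not on a queen line through the placed piece
--         si, sj = sign(di), sign(dj)
--         t = 1
--         while 0 <= r + t * si < n and 0 <= c + t * sj < n \
--                 and board[r + t * si][c + t * sj] not in (0, p):
--             t += 1
--         return d < t and 0 <= r + t * si < n and 0 <= c + t * sj < n \
--             and board[r + t * si][c + t * sj] == p != 0
--
--     out = [[p if captured(i, j) else board[i][j] for j in range(len(row))]
--            for i, row in enumerate(arr)]
--     out[r][c] = p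
--     return out
-- ===== Notes on version B (the rewrite author's own statement) =====
-- stated objective: alternative
-- what changed: B rebuilds the whole board functionally with a nested comprehension in which every cell decides for itself, via a line-of-sight predicate toward the placed piece, whether it was captured, instead of A's in-place per-direction flood that pushes flipped coordinates on a stack; A mutates arr, B returns a fresh board.
-- outside the precondition, e.g. on othello([[0, 5]], 0, 1, 1): A returns [[0, 1]], B returns [[0, 1]]
import Mathlib
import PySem

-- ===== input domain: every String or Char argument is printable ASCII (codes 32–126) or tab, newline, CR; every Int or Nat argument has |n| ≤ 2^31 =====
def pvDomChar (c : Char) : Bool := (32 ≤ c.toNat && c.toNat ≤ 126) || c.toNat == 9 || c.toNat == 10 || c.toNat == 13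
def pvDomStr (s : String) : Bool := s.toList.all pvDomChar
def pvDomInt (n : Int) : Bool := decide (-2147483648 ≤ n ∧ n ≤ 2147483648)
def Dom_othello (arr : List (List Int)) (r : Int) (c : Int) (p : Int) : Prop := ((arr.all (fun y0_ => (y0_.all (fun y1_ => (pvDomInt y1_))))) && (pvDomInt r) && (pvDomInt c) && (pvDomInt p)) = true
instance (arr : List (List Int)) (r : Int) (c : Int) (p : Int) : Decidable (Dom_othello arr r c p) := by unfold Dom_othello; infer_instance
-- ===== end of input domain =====

-- B rebuilds the board functionally: each cell decides by a line-of-sight predicate toward the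
-- placed piece whether it was captured, instead of A's in-place per-direction flood with a
-- coordinate stack (alternative decomposition, not faster). A mutates `arr` in place, B does
-- not; the theorems below are about the RETURNED board only.

-- shared cell primitives (Python's `arr[i][j]` read under checked bounds, and `arr[i][j] = p`
-- with Python's negative-index wraparound; each port uses them where its Python indexes)


def getCell (a : List (List Int)) (i j : Int) : Int := (a.getD i.toNat []).getD j.toNat 0

def setCell (a : List (List Int)) (r c p : Int) : List (List Int) :=
  let ri : Nat := (if r < 0 then r + (a.length : Int) else r).toNat
  let row := a.getD ri []
  let ci : Nat := (if c < 0 then c + (row.length : Int) else c).toNat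
  a.set ri (row.set ci p)

-- ===== PORT A =====
-- the `while True` loop; fuel 2*len(arr)+2 is a porting artifact (never exhausted on Pre_)

def scanA (a : List (List Int)) (p dr dc : Int) : Int → Int → List (Int × Int) → Nat → List (List Int)
  | _,  _,  _,     0        => a
  | vr, vc, stack, fuel + 1 =>
    let nr := vr + dr
    let nc := vc + dc
    if ¬(0 ≤ nr ∧ nr < (a.length : Int)) ∨ ¬(0 ≤ nc ∧ nc < (a.length : Int)) ∨ getCell a nr nc = 0 then a
    else if getCell a nr nc = p then stack.foldl (fun b ij => setCell b ij.1 ij.2 p) a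
    else scanA a p dr dc nr nc (stack ++ [(nr, nc)]) fuel

def othello (arr : List (List Int)) (r : Int) (c : Int) (p : Int) : List (List Int) :=
  let a0 := setCell arr r c p
  [((0:Int), (-1:Int)), (0, 1), (-1, 0), (1, 0), (-1, -1), (1, -1), (-1, 1), (1, 1)].foldl
    (fun a d => scanA a p d.1 d.2 r c [] (2 * a.length + 2)) a0

-- ===== PORT B =====
-- B's `sign`

def signB (x : Int) : Int := (if 0 < x then 1 else 0) - (if x < 0 then 1 else 0)

-- B's `while` loop advancing t along the ray (same fuel artifact)

def tloop (board : List (List Int)) (n p r c si sj : Int) : Int → Nat → Int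
  | t, 0        => t
  | t, fuel + 1 =>
    if 0 ≤ r + t * si ∧ r + t * si < n ∧ 0 ≤ c + t * sj ∧ c + t * sj < n ∧
       getCell board (r + t * si) (c + t * sj) ≠ 0 ∧ getCell board (r + t * si) (c + t * sj) ≠ p
    then tloop board n p r c si sj (t + 1) fuel else t

-- B's per-cell `captured(i, j)`

def capturedB (board : List (List Int)) (n p r c i j : Int) : Bool :=
  let di := i - r
  let dj := j - c
  let d := max |di| |dj|
  if d = 0 ∨ (di ≠ 0 ∧ dj ≠ 0 ∧ |di| ≠ |dj|) then false
  else
    let si := signB di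
    let sj := signB dj
    let t := tloop board n p r c si sj 1 (2 * board.length + 2)
    decide (d < t ∧ 0 ≤ r + t * si ∧ r + t * si < n ∧ 0 ≤ c + t * sj ∧ c + t * sj < n ∧
            getCell board (r + t * si) (c + t * sj) = p ∧ p ≠ 0)

def othello_alt (arr : List (List Int)) (r : Int) (c : Int) (p : Int) : List (List Int) :=
  let n : Int := arr.length
  let board := setCell arr r c p
  let out := (PySem.List.enumerate arr).map (fun ir =>
    (List.range ir.2.length).map (fun (j : Nat) =>
      if capturedB board n p r c ir.1 (j : Int) then p else getCell board ir.1 (j : Int)))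
  setCell out r c p

-- ===== PRECONDITION & SPEC =====
-- Pre_ excludes inputs where Python A can raise IndexError: boards with a row shorter than
-- len(arr) (the scan's column bound is the square bound len(arr), so it can read past a short
-- row) and r or c outside the negative-wrap square range; a few such inputs on which A's scan
-- happens to stop early and return are excluded with them.
def Pre_othello (arr : List (List Int)) (r : Int) (c : Int) (_p : Int) : Prop :=
  (∀ row ∈ arr, (arr.length : Int) ≤ (row.length : Int)) ∧
  -(arr.length : Int) ≤ r ∧ r < (arr.length : Int) ∧
  -(arr.length : Int) ≤ c ∧ c < (arr.length : Int)
instance (arr : List (List Int)) (r : Int) (c : Int) (p : Int) : Decidable (Pre_othello arr r c p) := by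
  unfold Pre_othello; infer_instance

def pvWitness_othello : List (List Int) × Int × Int × Int := ([[0, 2, 1], [0, 2, 0], [1, 0, 0]], 0, 0, 1)

def Spec_othello (arr : List (List Int)) (r : Int) (c : Int) (p : Int) (out : List (List Int)) : Prop := out = othello_alt arr r c p
instance (arr : List (List Int)) (r : Int) (c : Int) (p : Int) (out : List (List Int)) : Decidable (Spec_othello arr r c p out) := by unfold Spec_othello; infer_instance

-- ===== CLAIM (what is proved, stated in full; the proofs are below) =====
def Claim_equal_othello : Prop := ∀ (arr : List (List Int)) (r : Int) (c : Int) (p : Int), Dom_othello arr r c p → Pre_othello arr r c p → Spec_othello arr r c p (othello arr r c p)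

-- ===== LEMMAS AND PROOFS =====

lemma setCell_eq (a : List (List Int)) (r c p : Int) :
    setCell a r c p =
      a.set (if r < 0 then r + (a.length : Int) else r).toNat
        ((a.getD (if r < 0 then r + (a.length : Int) else r).toNat []).set
          (if c < 0 then c + ((a.getD (if r < 0 then r + (a.length : Int) else r).toNat []).length : Int) else c).toNat p) := rfl

lemma rowlen_set_set (a : List (List Int)) (ri ci : Nat) (p : Int) (k : Nat) :
    ((a.set ri ((a.getD ri []).set ci p)).getD k []).length = (a.getD k []).length := by
  simp only [List.getD_eq_getElem?_getD, List.getElem?_set]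
  by_cases h : ri = k
  · subst h
    by_cases hlt : ri < a.length
    · simp [hlt]
    · simp [hlt]
  · simp [h]

lemma rowlen_setCell (a : List (List Int)) (r c p : Int) (k : Nat) :
    ((setCell a r c p).getD k []).length = (a.getD k []).length := by
  rw [setCell_eq]; exact rowlen_set_set _ _ _ _ _

lemma getCell_setCell (a : List (List Int)) (x y p : Int) (hx0 : 0 ≤ x) (hxl : x < (a.length : Int))
    (hy0 : 0 ≤ y) (hyl : y < ((a.getD x.toNat []).length : Int)) (i j : Int) (hi : 0 ≤ i) (hj : 0 ≤ j) :
    getCell (setCell a x y p) i j = if i = x ∧ j = y then p else getCell a i j := by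
  rw [setCell_eq]
  rw [if_neg (show ¬ x < 0 by omega), if_neg (show ¬ y < 0 by omega)]
  unfold getCell
  have hxn : x.toNat < a.length := by omega
  have hyn : y.toNat < (a.getD x.toNat []).length := by omega
  rw [List.getD_eq_getElem?_getD] at hyn
  simp only [List.getD_eq_getElem?_getD, List.getElem?_set]
  by_cases hix : i.toNat = x.toNat
  · have hix' : i = x := by omega
    simp only [hix, if_pos hxn]
    by_cases hjy : j.toNat = y.toNat
    · have hjy' : j = y := by omega
      simp [hyn, hix', hjy']
    · have hne : ¬ (i = x ∧ j = y) := by omega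
      simp [hix', show y.toNat ≠ j.toNat by omega, show j ≠ y by omega]
  · simp [show ¬(i = x ∧ j = y) by omega, show x.toNat ≠ i.toNat by omega]

def wrapR (a : List (List Int)) (r : Int) : Int := if r < 0 then r + (a.length : Int) else r

def wrapC (a : List (List Int)) (r c : Int) : Int :=
  if c < 0 then c + ((a.getD (wrapR a r).toNat []).length : Int) else c

lemma setCell_eq_wrap (a : List (List Int)) (r c p : Int)
    (hr : -(a.length : Int) ≤ r) (hc : -((a.getD (wrapR a r).toNat []).length : Int) ≤ c) :
    setCell a r c p = setCell a (wrapR a r) (wrapC a r c) p := by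
  rw [setCell_eq, setCell_eq]
  unfold wrapC wrapR at *
  have hl : (0:Int) ≤ a.length := Int.natCast_nonneg _
  split_ifs at * <;> first | rfl | (exfalso; omega)

lemma tloop_ge (a : List (List Int)) (n p r c si sj : Int) :
    ∀ (fuel : Nat) (t0 : Int), t0 ≤ tloop a n p r c si sj t0 fuel := by
  intro fuel
  induction fuel with
  | zero => intro t0; simp [tloop]
  | succ f ih =>
    intro t0
    rw [tloop]
    split
    · exact le_trans (by omega) (ih (t0 + 1))
    · exact le_refl _

lemma tloop_inv (a : List (List Int)) (n p r c si sj : Int) :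
    ∀ (fuel : Nat) (t0 : Int), ∀ t : Int, t0 ≤ t → t < tloop a n p r c si sj t0 fuel →
    (0 ≤ r + t * si ∧ r + t * si < n ∧ 0 ≤ c + t * sj ∧ c + t * sj < n ∧
     getCell a (r + t * si) (c + t * sj) ≠ 0 ∧ getCell a (r + t * si) (c + t * sj) ≠ p) := by
  intro fuel
  induction fuel with
  | zero => intro t0 t h1 h2; rw [tloop] at h2; omega
  | succ f ih =>
    intro t0 t h1 h2
    rw [tloop] at h2
    split at h2
    · rename_i hc
      by_cases ht : t0 = t
      · exact ht ▸ hc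
      · exact ih (t0 + 1) t (by omega) h2
    · omega

lemma tloop_congr (a b : List (List Int)) (n p r c si sj : Int) :
    ∀ (fuel : Nat) (t0 : Int),
    (∀ t : Int, t0 ≤ t → 0 ≤ r + t * si → r + t * si < n → 0 ≤ c + t * sj → c + t * sj < n →
      getCell a (r + t * si) (c + t * sj) = getCell b (r + t * si) (c + t * sj)) →
    tloop a n p r c si sj t0 fuel = tloop b n p r c si sj t0 fuel := by
  intro fuel
  induction fuel with
  | zero => intro t0 _; rw [tloop, tloop]
  | succ f ih =>
    intro t0 hag
    rw [tloop, tloop]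
    by_cases hb : 0 ≤ r + t0 * si ∧ r + t0 * si < n ∧ 0 ≤ c + t0 * sj ∧ c + t0 * sj < n
    · rw [hag t0 le_rfl hb.1 hb.2.1 hb.2.2.1 hb.2.2.2]
      split
      · exact ih (t0 + 1) (fun t ht => hag t (by omega))
      · rfl
    · rw [if_neg (by tauto), if_neg (by tauto)]

lemma ray_disjoint (si sj si' sj' t t' : Int)
    (h1 : si = -1 ∨ si = 0 ∨ si = 1) (h2 : sj = -1 ∨ sj = 0 ∨ sj = 1)
    (h3 : si' = -1 ∨ si' = 0 ∨ si' = 1) (h4 : sj' = -1 ∨ sj' = 0 ∨ sj' = 1)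
    (hz : ¬(si = 0 ∧ sj = 0)) (hz' : ¬(si' = 0 ∧ sj' = 0))
    (hne : ¬(si = si' ∧ sj = sj')) (ht : 1 ≤ t) (ht' : 1 ≤ t')
    (he1 : t * si = t' * si') (he2 : t * sj = t' * sj') : False := by
  rcases h1 with rfl|rfl|rfl <;> rcases h2 with rfl|rfl|rfl <;>
    rcases h3 with rfl|rfl|rfl <;> rcases h4 with rfl|rfl|rfl <;> omega

def flipB (a : List (List Int)) (p dr dc r c k : Int) : List (List Int) :=
  (PySem.List.pyRange 1 k 1).foldl (fun b t => setCell b (r + t * dr) (c + t * dc) p) a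

def dirB (a : List (List Int)) (n p dr dc r c : Int) : List (List Int) :=
  let k := tloop a n p r c dr dc 1 (2 * a.length + 2)
  if 0 ≤ r + k * dr ∧ r + k * dr < n ∧ 0 ≤ c + k * dc ∧ c + k * dc < n ∧
     getCell a (r + k * dr) (c + k * dc) = p ∧ p ≠ 0
  then flipB a p dr dc r c k else a

set_option maxHeartbeats 1000000 in
lemma scan_eq (n p dr dc r c : Int)
    (hdr : dr = 0 ∨ dr = 1 ∨ dr = -1) (hdc : dc = 0 ∨ dc = 1 ∨ dc = -1) (hnz : ¬(dr = 0 ∧ dc = 0))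
    (hr1 : -n ≤ r) (hr2 : r < n) (hc1 : -n ≤ c) (hc2 : c < n) :
    ∀ (fuel : Nat) (j : Int) (a : List (List Int)), (a.length : Int) = n → 0 ≤ j →
    (j = 0 ∨ (0 ≤ r + j * dr ∧ r + j * dr < n ∧ 0 ≤ c + j * dc ∧ c + j * dc < n)) →
    2 * n + 2 - j ≤ (fuel : Int) →
    scanA a p dr dc (r + j * dr) (c + j * dc)
        ((PySem.List.pyRange 1 (j + 1) 1).map (fun t => (r + t * dr, c + t * dc))) fuel
      = (let k := tloop a n p r c dr dc (j + 1) fuel;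
         if 0 ≤ r + k * dr ∧ r + k * dr < n ∧ 0 ≤ c + k * dc ∧ c + k * dc < n ∧
            getCell a (r + k * dr) (c + k * dc) = p ∧ p ≠ 0
         then flipB a p dr dc r c k else a) := by
  intro fuel
  induction fuel with
  | zero =>
    intro j a hn hj hinv hfuel
    exfalso
    have hn0 : 0 ≤ n := hn ▸ Int.natCast_nonneg _
    simp only [Nat.cast_zero] at hfuel
    rcases hinv with h0 | ⟨h1, h2, h3, h4⟩
    · omega
    · rcases hdr with d | d | d <;> rcases hdc with e | e | e <;> subst d <;> subst e <;>
        simp only [mul_zero, mul_one, mul_neg_one, add_zero] at h1 h2 h3 h4 <;> omega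
  | succ fuel ih =>
    intro j a hn hj hinv hfuel
    have key : r + j * dr + dr = r + (j + 1) * dr := by ring
    have key2 : c + j * dc + dc = c + (j + 1) * dc := by ring
    simp only [scanA, key, key2]
    by_cases hin : 0 ≤ r + (j + 1) * dr ∧ r + (j + 1) * dr < n ∧ 0 ≤ c + (j + 1) * dc ∧ c + (j + 1) * dc < n
    · by_cases h0 : getCell a (r + (j + 1) * dr) (c + (j + 1) * dc) = 0
      · have hA : ¬(0 ≤ r + (j + 1) * dr ∧ r + (j + 1) * dr < (a.length : Int)) ∨
            ¬(0 ≤ c + (j + 1) * dc ∧ c + (j + 1) * dc < (a.length : Int)) ∨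
            getCell a (r + (j + 1) * dr) (c + (j + 1) * dc) = 0 := Or.inr (Or.inr h0)
        have hB : tloop a n p r c dr dc (j + 1) (fuel + 1) = j + 1 := by
          rw [tloop]; rw [if_neg (by tauto)]
        have hG : ¬(0 ≤ r + (j + 1) * dr ∧ r + (j + 1) * dr < n ∧ 0 ≤ c + (j + 1) * dc ∧
            c + (j + 1) * dc < n ∧ getCell a (r + (j + 1) * dr) (c + (j + 1) * dc) = p ∧ p ≠ 0) := by
          rintro ⟨-, -, -, -, hpq, hpz⟩; exact hpz (by rw [← hpq, h0])
        rw [if_pos hA, hB, if_neg hG]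
      · have hA : ¬(¬(0 ≤ r + (j + 1) * dr ∧ r + (j + 1) * dr < (a.length : Int)) ∨
            ¬(0 ≤ c + (j + 1) * dc ∧ c + (j + 1) * dc < (a.length : Int)) ∨
            getCell a (r + (j + 1) * dr) (c + (j + 1) * dc) = 0) := by
          rw [hn]; simp only [not_or, not_not]; exact ⟨⟨hin.1, hin.2.1⟩, ⟨hin.2.2.1, hin.2.2.2⟩, h0⟩
        by_cases hp : getCell a (r + (j + 1) * dr) (c + (j + 1) * dc) = p
        · have hB : tloop a n p r c dr dc (j + 1) (fuel + 1) = j + 1 := by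
            rw [tloop]; rw [if_neg (by tauto)]
          have hG : 0 ≤ r + (j + 1) * dr ∧ r + (j + 1) * dr < n ∧ 0 ≤ c + (j + 1) * dc ∧
              c + (j + 1) * dc < n ∧ getCell a (r + (j + 1) * dr) (c + (j + 1) * dc) = p ∧ p ≠ 0 :=
            ⟨hin.1, hin.2.1, hin.2.2.1, hin.2.2.2, hp, fun hz => h0 (by rw [hp, hz])⟩
          rw [if_neg hA, if_pos hp, hB, if_pos hG, flipB, List.foldl_map]
        · have hB : tloop a n p r c dr dc (j + 1) (fuel + 1) = tloop a n p r c dr dc (j + 1 + 1) fuel := by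
            rw [tloop]; rw [if_pos ⟨hin.1, hin.2.1, hin.2.2.1, hin.2.2.2, h0, hp⟩]
          rw [if_neg hA, if_neg hp, hB]
          have hstack : PySem.List.pyRange 1 (j + 1 + 1) 1 = PySem.List.pyRange 1 (j + 1) 1 ++ [j + 1] :=
            PySem.List.pyRange_one_succ_right (by omega)
          have hIH := ih (j + 1) a hn (by omega) (Or.inr hin) (by push_cast at hfuel ⊢; omega)
          rw [hstack, List.map_append] at hIH
          simpa using hIH
    · have hA : ¬(0 ≤ r + (j + 1) * dr ∧ r + (j + 1) * dr < (a.length : Int)) ∨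
          ¬(0 ≤ c + (j + 1) * dc ∧ c + (j + 1) * dc < (a.length : Int)) ∨
          getCell a (r + (j + 1) * dr) (c + (j + 1) * dc) = 0 := by rw [hn]; tauto
      have hB : tloop a n p r c dr dc (j + 1) (fuel + 1) = j + 1 := by
        rw [tloop]; rw [if_neg (by tauto)]
      have hG : ¬(0 ≤ r + (j + 1) * dr ∧ r + (j + 1) * dr < n ∧ 0 ≤ c + (j + 1) * dc ∧
          c + (j + 1) * dc < n ∧ getCell a (r + (j + 1) * dr) (c + (j + 1) * dc) = p ∧ p ≠ 0) := by
        rintro ⟨a1, a2, a3, a4, -, -⟩; exact hin ⟨a1, a2, a3, a4⟩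
      rw [if_pos hA, hB, if_neg hG]

lemma step_eq (n p dr dc r c : Int)
    (hdr : dr = 0 ∨ dr = 1 ∨ dr = -1) (hdc : dc = 0 ∨ dc = 1 ∨ dc = -1) (hnz : ¬(dr = 0 ∧ dc = 0))
    (hr1 : -n ≤ r) (hr2 : r < n) (hc1 : -n ≤ c) (hc2 : c < n)
    (a : List (List Int)) (hn : (a.length : Int) = n) :
    scanA a p dr dc r c [] (2 * a.length + 2) = dirB a n p dr dc r c := by
  have h := scan_eq n p dr dc r c hdr hdc hnz hr1 hr2 hc1 hc2 (2 * a.length + 2) 0 a hn le_rfl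
    (Or.inl rfl) (by push_cast; omega)
  simp only [zero_mul, add_zero, zero_add, PySem.List.pyRange_one_eq_nil (le_refl (1 : Int)),
    List.map_nil] at h
  unfold dirB
  exact h

def validDir (d : Int × Int) : Prop :=
  (d.1 = -1 ∨ d.1 = 0 ∨ d.1 = 1) ∧ (d.2 = -1 ∨ d.2 = 0 ∨ d.2 = 1) ∧ ¬(d.1 = 0 ∧ d.2 = 0)

lemma length_setCell (a : List (List Int)) (r c p : Int) : (setCell a r c p).length = a.length := by
  simp [setCell]

lemma length_foldl_setCell {α : Type} (l : List α) (f g : α → Int) (a : List (List Int)) (p : Int) :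
    (l.foldl (fun b x => setCell b (f x) (g x) p) a).length = a.length := by
  induction l generalizing a with
  | nil => rfl
  | cons x xs ih => simpa [List.foldl, length_setCell] using ih (setCell a (f x) (g x) p)

lemma length_flipB (a : List (List Int)) (p dr dc r c k : Int) : (flipB a p dr dc r c k).length = a.length := by
  unfold flipB; exact length_foldl_setCell _ _ _ _ _

lemma rowlen_foldl_setCell {α : Type} (l : List α) (f g : α → Int) (a : List (List Int)) (p : Int) (m : Nat) :
    ((l.foldl (fun b x => setCell b (f x) (g x) p) a).getD m []).length = (a.getD m []).length := by
  induction l generalizing a with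
  | nil => rfl
  | cons x xs ih =>
    simp only [List.foldl_cons]
    rw [ih (setCell a (f x) (g x) p), rowlen_setCell]

lemma rowlen_flipB (a : List (List Int)) (p dr dc r c k : Int) (m : Nat) :
    ((flipB a p dr dc r c k).getD m []).length = (a.getD m []).length := by
  unfold flipB; exact rowlen_foldl_setCell _ _ _ _ _ _

lemma length_dirB (a : List (List Int)) (n p dr dc r c : Int) : (dirB a n p dr dc r c).length = a.length := by
  unfold dirB
  dsimp only
  split
  · exact length_flipB _ _ _ _ _ _ _
  · rfl

lemma rowlen_dirB (a : List (List Int)) (n p dr dc r c : Int) (m : Nat) :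
    ((dirB a n p dr dc r c).getD m []).length = (a.getD m []).length := by
  unfold dirB
  dsimp only
  split
  · exact rowlen_flipB _ _ _ _ _ _ _ _
  · rfl

lemma fold_eq (n p r c : Int)
    (hr1 : -n ≤ r) (hr2 : r < n) (hc1 : -n ≤ c) (hc2 : c < n) :
    ∀ (ds : List (Int × Int)), (∀ d ∈ ds, validDir d) →
    ∀ a : List (List Int), (a.length : Int) = n →
    ds.foldl (fun a d => scanA a p d.1 d.2 r c [] (2 * a.length + 2)) a
      = ds.foldl (fun a d => dirB a n p d.1 d.2 r c) a := by
  intro ds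
  induction ds with
  | nil => intro _ a _; rfl
  | cons d ds ih =>
    intro hds a hn
    have hd := hds d (List.mem_cons_self)
    simp only [List.foldl_cons]
    unfold validDir at hd
    rw [step_eq n p d.1 d.2 r c (by tauto) (by tauto) hd.2.2 hr1 hr2 hc1 hc2 a hn]
    exact ih (fun x hx => hds x (List.mem_cons_of_mem d hx)) _ (by rw [length_dirB, hn])

lemma getCell_foldl_set (p si sj r c : Int) :
    ∀ (ts : List Int) (a : List (List Int)),
    (∀ t ∈ ts, 0 ≤ r + t * si ∧ r + t * si < (a.length : Int) ∧ 0 ≤ c + t * sj ∧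
      c + t * sj < ((a.getD (r + t * si).toNat []).length : Int)) →
    ∀ (i j : Int), 0 ≤ i → 0 ≤ j →
    ((∃ t ∈ ts, i = r + t * si ∧ j = c + t * sj) →
      getCell (ts.foldl (fun b t => setCell b (r + t * si) (c + t * sj) p) a) i j = p) ∧
    (¬(∃ t ∈ ts, i = r + t * si ∧ j = c + t * sj) →
      getCell (ts.foldl (fun b t => setCell b (r + t * si) (c + t * sj) p) a) i j = getCell a i j) := by
  intro ts
  induction ts with
  | nil => intro a _ i j _ _; exact ⟨by simp, fun _ => rfl⟩
  | cons t ts ih =>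
    intro a hb i j hi hj
    have hbt := hb t (List.mem_cons_self)
    have hset := getCell_setCell a (r + t * si) (c + t * sj) p hbt.1 hbt.2.1 hbt.2.2.1 hbt.2.2.2 i j hi hj
    have hb' : ∀ u ∈ ts, 0 ≤ r + u * si ∧ r + u * si < ((setCell a (r + t * si) (c + t * sj) p).length : Int) ∧
        0 ≤ c + u * sj ∧ c + u * sj < (((setCell a (r + t * si) (c + t * sj) p).getD (r + u * si).toNat []).length : Int) := by
      intro u hu
      have := hb u (List.mem_cons_of_mem t hu)
      rwa [length_setCell, rowlen_setCell]
    have hIH := ih (setCell a (r + t * si) (c + t * sj) p) hb' i j hi hj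
    simp only [List.foldl_cons]
    constructor
    · rintro ⟨u, hu, hiju⟩
      rcases List.mem_cons.mp hu with rfl | hu'
      · by_cases hrest : ∃ u ∈ ts, i = r + u * si ∧ j = c + u * sj
        · exact hIH.1 hrest
        · rw [hIH.2 hrest, hset, if_pos ⟨hiju.1, hiju.2⟩]
      · exact hIH.1 ⟨u, hu', hiju⟩
    · intro hno
      have hnt : ¬(i = r + t * si ∧ j = c + t * sj) := fun h => hno ⟨t, List.mem_cons_self, h⟩
      have hnts : ¬ ∃ u ∈ ts, i = r + u * si ∧ j = c + u * sj := by
        rintro ⟨u, hu, h⟩; exact hno ⟨u, List.mem_cons_of_mem t hu, h⟩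
      rw [hIH.2 hnts, hset, if_neg hnt]

lemma getCell_flipB (a : List (List Int)) (p si sj r c k : Int)
    (hb : ∀ t : Int, 1 ≤ t → t < k → 0 ≤ r + t * si ∧ r + t * si < (a.length : Int) ∧ 0 ≤ c + t * sj ∧
          c + t * sj < ((a.getD (r + t * si).toNat []).length : Int))
    (i j : Int) (hi : 0 ≤ i) (hj : 0 ≤ j) :
    ((∃ t : Int, 1 ≤ t ∧ t < k ∧ i = r + t * si ∧ j = c + t * sj) →
      getCell (flipB a p si sj r c k) i j = p) ∧
    (¬(∃ t : Int, 1 ≤ t ∧ t < k ∧ i = r + t * si ∧ j = c + t * sj) →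
      getCell (flipB a p si sj r c k) i j = getCell a i j) := by
  have h := getCell_foldl_set p si sj r c (PySem.List.pyRange 1 k 1) a
    (fun t ht => hb t (PySem.List.mem_pyRange_one.mp ht).1 (PySem.List.mem_pyRange_one.mp ht).2) i j hi hj
  unfold flipB
  constructor
  · rintro ⟨t, h1, h2, h3⟩
    exact h.1 ⟨t, PySem.List.mem_pyRange_one.mpr ⟨h1, h2⟩, h3⟩
  · intro hno
    refine h.2 ?_
    rintro ⟨t, ht, h3⟩
    have := PySem.List.mem_pyRange_one.mp ht
    exact hno ⟨t, this.1, this.2, h3⟩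

def FlipT (a0 : List (List Int)) (n p r c si sj i j : Int) : Prop :=
  let k := tloop a0 n p r c si sj 1 (2 * a0.length + 2)
  (0 ≤ r + k * si ∧ r + k * si < n ∧ 0 ≤ c + k * sj ∧ c + k * sj < n ∧
   getCell a0 (r + k * si) (c + k * sj) = p ∧ p ≠ 0) ∧
  ∃ t : Int, 1 ≤ t ∧ t < k ∧ i = r + t * si ∧ j = c + t * sj

def FlipAny (a0 : List (List Int)) (n p r c : Int) (P : List (Int × Int)) (i j : Int) : Prop :=
  ∃ d ∈ P, FlipT a0 n p r c d.1 d.2 i j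

set_option maxHeartbeats 2000000 in
lemma fold_cell (arr : List (List Int)) (p r c : Int)
    (hrow : ∀ row ∈ arr, (arr.length : Int) ≤ (row.length : Int)) :
    ∀ (ds P : List (Int × Int)) (a' : List (List Int)),
    (∀ d ∈ ds, validDir d) → (∀ d ∈ P, validDir d) →
    (∀ d ∈ ds, ∀ d' ∈ P, d ≠ d') → List.Pairwise (· ≠ ·) ds →
    a'.length = arr.length →
    (∀ m : Nat, (a'.getD m []).length = (arr.getD m []).length) →
    (∀ i j : Int, 0 ≤ i → 0 ≤ j →
      (FlipAny (setCell arr r c p) (arr.length : Int) p r c P i j → getCell a' i j = p) ∧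
      (¬ FlipAny (setCell arr r c p) (arr.length : Int) p r c P i j →
        getCell a' i j = getCell (setCell arr r c p) i j)) →
    (ds.foldl (fun a d => dirB a (arr.length : Int) p d.1 d.2 r c) a').length = arr.length ∧
    (∀ m : Nat, ((ds.foldl (fun a d => dirB a (arr.length : Int) p d.1 d.2 r c) a').getD m []).length = (arr.getD m []).length) ∧
    (∀ i j : Int, 0 ≤ i → 0 ≤ j →
      (FlipAny (setCell arr r c p) (arr.length : Int) p r c (P ++ ds) i j →
        getCell (ds.foldl (fun a d => dirB a (arr.length : Int) p d.1 d.2 r c) a') i j = p) ∧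
      (¬ FlipAny (setCell arr r c p) (arr.length : Int) p r c (P ++ ds) i j →
        getCell (ds.foldl (fun a d => dirB a (arr.length : Int) p d.1 d.2 r c) a') i j
          = getCell (setCell arr r c p) i j)) := by
  intro ds
  induction ds with
  | nil =>
    intro P a' _ _ _ _ hlen hrl hcell
    refine ⟨hlen, hrl, ?_⟩
    simpa using hcell
  | cons d ds ih =>
    intro P a' hv hP hdisj hpw hlen hrl hcell
    -- abbreviations
    set n : Int := (arr.length : Int) with hn
    set a0 : List (List Int) := setCell arr r c p with ha0
    have ha0len : a0.length = arr.length := length_setCell _ _ _ _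
    have hd : validDir d := hv d List.mem_cons_self
    obtain ⟨hd1, hd2, hd3⟩ := hd
    -- (s1) the current board agrees with a0 on the in-bounds cells of d's ray
    have hag : ∀ t : Int, 1 ≤ t → 0 ≤ r + t * d.1 → r + t * d.1 < n → 0 ≤ c + t * d.2 → c + t * d.2 < n →
        getCell a' (r + t * d.1) (c + t * d.2) = getCell a0 (r + t * d.1) (c + t * d.2) := by
      intro t ht hb1 hb2 hb3 hb4
      refine (hcell (r + t * d.1) (c + t * d.2) hb1 hb3).2 ?_
      rintro ⟨d', hd'P, hF⟩
      have hvd' := hP d' hd'P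
      obtain ⟨hd'1, hd'2, hd'3⟩ := hvd'
      obtain ⟨-, t', ht'1, ht'2, hpe1, hpe2⟩ := hF
      have hne : d ≠ d' := hdisj d List.mem_cons_self d' hd'P
      have hnec : ¬(d.1 = d'.1 ∧ d.2 = d'.2) := by
        rintro ⟨e1, e2⟩; exact hne (Prod.ext e1 e2)
      exact ray_disjoint d.1 d.2 d'.1 d'.2 t t' hd1 hd2 hd'1 hd'2 hd3 hd'3 hnec ht ht'1
        (by omega) (by omega)
    -- (s2) same run length on the current board and on a0
    have hk : tloop a' n p r c d.1 d.2 1 (2 * a'.length + 2) = tloop a0 n p r c d.1 d.2 1 (2 * a0.length + 2) := by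
      rw [hlen, ← ha0len]
      exact tloop_congr a' a0 n p r c d.1 d.2 _ 1 (fun t ht => hag t ht)
    set k : Int := tloop a0 n p r c d.1 d.2 1 (2 * a0.length + 2) with hkdef
    have hk1 : 1 ≤ k := tloop_ge a0 n p r c d.1 d.2 _ 1
    -- (s3) same guard
    have hguard : (0 ≤ r + k * d.1 ∧ r + k * d.1 < n ∧ 0 ≤ c + k * d.2 ∧ c + k * d.2 < n ∧
        getCell a' (r + k * d.1) (c + k * d.2) = p ∧ p ≠ 0)
        ↔ (0 ≤ r + k * d.1 ∧ r + k * d.1 < n ∧ 0 ≤ c + k * d.2 ∧ c + k * d.2 < n ∧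
        getCell a0 (r + k * d.1) (c + k * d.2) = p ∧ p ≠ 0) := by
      by_cases hb : 0 ≤ r + k * d.1 ∧ r + k * d.1 < n ∧ 0 ≤ c + k * d.2 ∧ c + k * d.2 < n
      · rw [hag k hk1 hb.1 hb.2.1 hb.2.2.1 hb.2.2.2]
      · constructor <;> (rintro ⟨x1, x2, x3, x4, -, -⟩; exact absurd ⟨x1, x2, x3, x4⟩ hb)
    -- rows of arr below the diagonal bound
    have hrowD : ∀ m : Nat, m < arr.length → n ≤ ((arr.getD m []).length : Int) := by
      intro m hm
      have : arr.getD m [] ∈ arr := by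
        rw [List.getD_eq_getElem?_getD, List.getElem?_eq_getElem hm]
        exact List.getElem_mem hm
      exact hrow _ this
    -- (s4) one dirB step preserves the invariant, with d recorded
    have hstep : ∀ i j : Int, 0 ≤ i → 0 ≤ j →
        (FlipAny a0 n p r c (P ++ [d]) i j → getCell (dirB a' n p d.1 d.2 r c) i j = p) ∧
        (¬ FlipAny a0 n p r c (P ++ [d]) i j →
          getCell (dirB a' n p d.1 d.2 r c) i j = getCell a0 i j) := by
      intro i j hi hj
      unfold dirB
      dsimp only
      rw [hk]
      by_cases hg : 0 ≤ r + k * d.1 ∧ r + k * d.1 < n ∧ 0 ≤ c + k * d.2 ∧ c + k * d.2 < n ∧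
          getCell a0 (r + k * d.1) (c + k * d.2) = p ∧ p ≠ 0
      · rw [if_pos (hguard.mpr hg)]
        have hbnd : ∀ t : Int, 1 ≤ t → t < k → 0 ≤ r + t * d.1 ∧ r + t * d.1 < (a'.length : Int) ∧
            0 ≤ c + t * d.2 ∧ c + t * d.2 < ((a'.getD (r + t * d.1).toNat []).length : Int) := by
          intro t h1 h2
          have := tloop_inv a0 n p r c d.1 d.2 _ 1 t h1 h2
          have hb1 := this.1; have hb2 := this.2.1; have hb3 := this.2.2.1; have hb4 := this.2.2.2.1
          refine ⟨hb1, by omega, hb3, ?_⟩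
          rw [hrl (r + t * d.1).toNat]
          have : (r + t * d.1).toNat < arr.length := by omega
          have := hrowD _ this
          omega
        have hflip := getCell_flipB a' p d.1 d.2 r c k hbnd i j hi hj
        constructor
        · rintro ⟨d', hd'm, hF⟩
          rcases List.mem_append.mp hd'm with hd'P | hd'd
          · -- an earlier direction flipped (i,j); d's pass keeps it p or it is in d's set
            by_cases hdt : ∃ t : Int, 1 ≤ t ∧ t < k ∧ i = r + t * d.1 ∧ j = c + t * d.2
            · exact hflip.1 hdt
            · rw [hflip.2 hdt]
              exact (hcell i j hi hj).1 ⟨d', hd'P, hF⟩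
          · -- d itself flips (i,j)
            have : d' = d := by simpa using hd'd
            subst this
            obtain ⟨-, t, h1, h2, h3, h4⟩ := hF
            exact hflip.1 ⟨t, h1, h2, h3, h4⟩
        · intro hno
          have hnd : ¬ ∃ t : Int, 1 ≤ t ∧ t < k ∧ i = r + t * d.1 ∧ j = c + t * d.2 := by
            rintro ⟨t, h1, h2, h3, h4⟩
            exact hno ⟨d, List.mem_append.mpr (Or.inr (by simp)), hg, t, h1, h2, h3, h4⟩
          rw [hflip.2 hnd]
          exact (hcell i j hi hj).2 (fun ⟨d', hd'P, hF⟩ =>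
            hno ⟨d', List.mem_append.mpr (Or.inl hd'P), hF⟩)
      · rw [if_neg (fun hh => hg (hguard.mp hh))]
        constructor
        · rintro ⟨d', hd'm, hF⟩
          rcases List.mem_append.mp hd'm with hd'P | hd'd
          · exact (hcell i j hi hj).1 ⟨d', hd'P, hF⟩
          · have : d' = d := by simpa using hd'd
            subst this
            exact absurd hF.1 hg
        · intro hno
          exact (hcell i j hi hj).2 (fun ⟨d', hd'P, hF⟩ =>
            hno ⟨d', List.mem_append.mpr (Or.inl hd'P), hF⟩)
    -- apply the induction hypothesis with P ++ [d]
    have hIH := ih (P ++ [d]) (dirB a' n p d.1 d.2 r c)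
      (fun e he => hv e (List.mem_cons_of_mem d he))
      (by
        intro e he
        rcases List.mem_append.mp he with h | h
        · exact hP e h
        · have : e = d := by simpa using h
          exact this ▸ hv d List.mem_cons_self)
      (by
        intro e he d' hd'
        rcases List.mem_append.mp hd' with h | h
        · exact hdisj e (List.mem_cons_of_mem d he) d' h
        · have : d' = d := by simpa using h
          subst this
          exact fun hh => (List.pairwise_cons.mp hpw).1 e he hh.symm)
      hpw.of_cons
      (by rw [length_dirB, hlen])
      (fun m => by rw [rowlen_dirB, hrl m])
      hstep
    simp only [List.foldl_cons]
    refine ⟨hIH.1, hIH.2.1, ?_⟩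
    intro i j hi hj
    have := hIH.2.2 i j hi hj
    rwa [List.append_assoc, List.singleton_append] at this

lemma cell_decomp (di dj : Int) (hnc : ¬(max |di| |dj| = 0 ∨ (di ≠ 0 ∧ dj ≠ 0 ∧ |di| ≠ |dj|))) :
    (signB di = -1 ∨ signB di = 0 ∨ signB di = 1) ∧ (signB dj = -1 ∨ signB dj = 0 ∨ signB dj = 1) ∧
    ¬(signB di = 0 ∧ signB dj = 0) ∧
    di = max |di| |dj| * signB di ∧ dj = max |di| |dj| * signB dj ∧ 1 ≤ max |di| |dj| := by
  unfold signB
  split_ifs <;> simp only [Int.abs_eq_natAbs] at * <;> omega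

lemma ray_decomp (si sj t0 : Int) (h1 : si = -1 ∨ si = 0 ∨ si = 1) (h2 : sj = -1 ∨ sj = 0 ∨ sj = 1)
    (hz : ¬(si = 0 ∧ sj = 0)) (ht : 1 ≤ t0) :
    max |t0 * si| |t0 * sj| = t0 ∧ signB (t0 * si) = si ∧ signB (t0 * sj) = sj ∧
    ¬(max |t0 * si| |t0 * sj| = 0 ∨ (t0 * si ≠ 0 ∧ t0 * sj ≠ 0 ∧ |t0 * si| ≠ |t0 * sj|)) := by
  unfold signB
  rcases h1 with rfl|rfl|rfl <;> rcases h2 with rfl|rfl|rfl <;>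
    simp only [mul_neg_one, mul_zero, mul_one, abs_neg, abs_zero] <;>
    split_ifs <;> simp only [Int.abs_eq_natAbs] at * <;>
    first | omega | (exact absurd ⟨trivial, trivial⟩ hz)

lemma valid_of_mem8 : ∀ d ∈ [((0:Int), (-1:Int)), (0, 1), (-1, 0), (1, 0), (-1, -1), (1, -1), (-1, 1), (1, 1)], validDir d := by
  intro d hd
  fin_cases hd <;> exact ⟨by simp, by simp, by simp⟩

lemma captured_iff (a0 : List (List Int)) (n p r c i j : Int) :
    capturedB a0 n p r c i j = true ↔
      FlipAny a0 n p r c [((0:Int), (-1:Int)), (0, 1), (-1, 0), (1, 0), (-1, -1), (1, -1), (-1, 1), (1, 1)] i j := by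
  unfold capturedB
  dsimp only
  split_ifs with hcond
  · simp only [false_iff]
    rintro ⟨d, hd, hF⟩
    obtain ⟨hd1, hd2, hd3⟩ := valid_of_mem8 d hd
    obtain ⟨-, t0, ht0, -, rfl, rfl⟩ := hF
    have hdec := ray_decomp d.1 d.2 t0 hd1 hd2 hd3 ht0
    rw [add_sub_cancel_left, add_sub_cancel_left] at hcond
    exact hdec.2.2.2 hcond
  · rw [decide_eq_true_iff]
    constructor
    · rintro ⟨hlt, hb1, hb2, hb3, hb4, hp, hpz⟩
      have hdec := cell_decomp (i - r) (j - c) hcond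
      refine ⟨(signB (i - r), signB (j - c)), ?_, ?_, ?_⟩
      · rcases hdec.1 with h|h|h <;> rcases hdec.2.1 with h'|h'|h' <;>
          simp [h, h'] <;> exact absurd ⟨h, h'⟩ hdec.2.2.1
      · exact ⟨hb1, hb2, hb3, hb4, hp, hpz⟩
      · refine ⟨max |i - r| |j - c|, hdec.2.2.2.2.2, hlt, ?_, ?_⟩
        · have h := hdec.2.2.2.1; linarith
        · have h := hdec.2.2.2.2.1; linarith
    · rintro ⟨d, hd, hF⟩
      obtain ⟨hd1, hd2, hd3⟩ := valid_of_mem8 d hd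
      obtain ⟨hg, t0, ht0, hlt, hieq, hjeq⟩ := hF
      have hdec := ray_decomp d.1 d.2 t0 hd1 hd2 hd3 ht0
      have hdi : i - r = t0 * d.1 := by linarith
      have hdj : j - c = t0 * d.2 := by linarith
      rw [hdi, hdj, hdec.1, hdec.2.1, hdec.2.2.1]
      exact ⟨hlt, hg.1, hg.2.1, hg.2.2.1, hg.2.2.2.1, hg.2.2.2.2.1, hg.2.2.2.2.2⟩

lemma out_row (arr : List (List Int)) (g : Int → Nat → Int) (m : Nat) (hm : m < arr.length) :
    ((PySem.List.enumerate arr).map (fun ir => (List.range ir.2.length).map (fun j => g ir.1 j))).getD m []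
      = (List.range (arr.getD m []).length).map (fun j => g ↑m j) := by
  rw [List.getD_eq_getElem?_getD, List.getElem?_map, PySem.List.getElem?_enumerate]
  simp [List.getElem?_eq_getElem hm, List.getD_eq_getElem?_getD]

lemma out_len (arr : List (List Int)) (g : Int → Nat → Int) :
    ((PySem.List.enumerate arr).map (fun ir => (List.range ir.2.length).map (fun j => g ir.1 j))).length
      = arr.length := by
  simp [PySem.List.length_enumerate]

lemma out_cell (arr : List (List Int)) (g : Int → Nat → Int) (m k : Nat) (hm : m < arr.length)
    (hk : k < (arr.getD m []).length) :
    getCell ((PySem.List.enumerate arr).map (fun ir => (List.range ir.2.length).map (fun j => g ir.1 j))) ↑m ↑k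
      = g ↑m k := by
  unfold getCell
  rw [Int.toNat_natCast, Int.toNat_natCast, out_row arr g m hm]
  rw [List.getD_eq_getElem?_getD, List.getElem?_map, List.getElem?_range hk]
  rfl

lemma getElem_eq_getCell (b : List (List Int)) (m k : Nat) (hm : m < b.length) (hk : k < b[m].length) :
    b[m][k] = getCell b ↑m ↑k := by
  unfold getCell
  rw [Int.toNat_natCast, Int.toNat_natCast]
  simp [List.getD_eq_getElem?_getD, List.getElem?_eq_getElem hm, List.getElem?_eq_getElem hk]

lemma wrap_bounds (arr : List (List Int)) (r c : Int)
    (hrowD : ∀ m : Nat, m < arr.length → (arr.length : Int) ≤ ((arr.getD m []).length : Int))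
    (hr1 : -(arr.length : Int) ≤ r) (hr2 : r < (arr.length : Int))
    (hc1 : -(arr.length : Int) ≤ c) (hc2 : c < (arr.length : Int)) :
    0 ≤ wrapR arr r ∧ wrapR arr r < (arr.length : Int) ∧ 0 ≤ wrapC arr r c ∧
      wrapC arr r c < ((arr.getD (wrapR arr r).toNat []).length : Int) := by
  have hwr : 0 ≤ wrapR arr r ∧ wrapR arr r < (arr.length : Int) := by
    unfold wrapR; split_ifs <;> omega
  have hlen := hrowD (wrapR arr r).toNat (by omega)
  refine ⟨hwr.1, hwr.2, ?_, ?_⟩ <;> (unfold wrapC; split_ifs <;> omega)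

theorem othello_equiv (arr : List (List Int)) (r c p : Int)
    (hrow : ∀ row ∈ arr, (arr.length : Int) ≤ (row.length : Int))
    (hr1 : -(arr.length : Int) ≤ r) (hr2 : r < (arr.length : Int))
    (hc1 : -(arr.length : Int) ≤ c) (hc2 : c < (arr.length : Int)) :
    othello arr r c p = othello_alt arr r c p := by
  have hrowD : ∀ m : Nat, m < arr.length → (arr.length : Int) ≤ ((arr.getD m []).length : Int) := by
    intro m hm
    have : arr.getD m [] ∈ arr := by
      rw [List.getD_eq_getElem?_getD, List.getElem?_eq_getElem hm]
      exact List.getElem_mem hm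
    exact hrow _ this
  unfold othello othello_alt
  dsimp only
  rw [fold_eq (arr.length : Int) p r c hr1 hr2 hc1 hc2 _ valid_of_mem8 _ (by rw [length_setCell])]
  have hfc := fold_cell arr p r c hrow
    [((0:Int), (-1:Int)), (0, 1), (-1, 0), (1, 0), (-1, -1), (1, -1), (-1, 1), (1, 1)] []
    (setCell arr r c p) valid_of_mem8 (by simp) (by simp) (by decide)
    (length_setCell _ _ _ _) (fun m => rowlen_setCell _ _ _ _ _)
    (fun i j hi hj => ⟨fun ⟨d, hd, _⟩ => by simp at hd, fun _ => rfl⟩)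
  obtain ⟨hFlen, hFrow, hFcell⟩ := hfc
  simp only [List.nil_append] at hFcell
  set a0 : List (List Int) := setCell arr r c p with ha0
  set F : List (List Int) :=
    [((0:Int), (-1:Int)), (0, 1), (-1, 0), (1, 0), (-1, -1), (1, -1), (-1, 1), (1, 1)].foldl
      (fun a d => dirB a (arr.length : Int) p d.1 d.2 r c) a0 with hF
  set out : List (List Int) := (PySem.List.enumerate arr).map (fun ir =>
    (List.range ir.2.length).map (fun (j : Nat) =>
      if capturedB a0 (arr.length : Int) p r c ir.1 (j : Int) then p
      else getCell a0 ir.1 (j : Int))) with hout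
  have houtlen : out.length = arr.length := by
    rw [hout]; exact out_len arr (fun i (j : Nat) => if capturedB a0 (arr.length : Int) p r c i (j : Int) then p else getCell a0 i (j : Int))
  have houtrow : ∀ m : Nat, (out.getD m []).length = (arr.getD m []).length := by
    intro m
    by_cases hm : m < arr.length
    · rw [hout, out_row arr (fun i (j : Nat) => if capturedB a0 (arr.length : Int) p r c i (j : Int) then p else getCell a0 i (j : Int)) m hm]; simp
    · have h1 : out.length ≤ m := by rw [houtlen]; omega
      have h2 : arr.length ≤ m := by omega
      rw [List.getD_eq_getElem?_getD, List.getD_eq_getElem?_getD,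
        List.getElem?_eq_none h1, List.getElem?_eq_none h2]
  have hwr : wrapR out r = wrapR arr r := by unfold wrapR; rw [houtlen]
  have hwc : wrapC out r c = wrapC arr r c := by unfold wrapC; rw [hwr, houtrow]
  obtain ⟨hwb1, hwb2, hwb3, hwb4⟩ := wrap_bounds arr r c hrowD hr1 hr2 hc1 hc2
  have hsetout : setCell out r c p = setCell out (wrapR arr r) (wrapC arr r c) p := by
    rw [← hwr, ← hwc]
    refine setCell_eq_wrap out r c p (by rw [houtlen]; exact hr1) ?_
    rw [hwr, houtrow]
    have := hrowD (wrapR arr r).toNat (by omega)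
    omega
  have hseta0 : a0 = setCell arr (wrapR arr r) (wrapC arr r c) p := by
    rw [ha0]
    refine setCell_eq_wrap arr r c p hr1 ?_
    have := hrowD (wrapR arr r).toNat (by omega)
    omega
  apply List.ext_getElem (by rw [hFlen, length_setCell, houtlen])
  intro m hm1 hm2
  have hmlen : m < arr.length := by rwa [hFlen] at hm1
  apply List.ext_getElem (by
    have h1 : F[m].length = (F.getD m []).length := by
      rw [List.getD_eq_getElem?_getD, List.getElem?_eq_getElem hm1]; rfl
    have h2 : (setCell out r c p)[m].length = ((setCell out r c p).getD m []).length := by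
      rw [List.getD_eq_getElem?_getD, List.getElem?_eq_getElem hm2]; rfl
    rw [h1, h2, hFrow m, rowlen_setCell, houtrow])
  intro k hk1 hk2
  have hkarr : k < (arr.getD m []).length := by
    have h1 : F[m].length = (F.getD m []).length := by
      rw [List.getD_eq_getElem?_getD, List.getElem?_eq_getElem hm1]; rfl
    have := hFrow m
    omega
  rw [getElem_eq_getCell F m k hm1 hk1, getElem_eq_getCell _ m k hm2 hk2]
  have houtcell : getCell out ↑m ↑k = if capturedB a0 (arr.length : Int) p r c ↑m ↑k then p
      else getCell a0 ↑m ↑k := by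
    rw [hout]
    exact out_cell arr (fun i (j : Nat) => if capturedB a0 (arr.length : Int) p r c i (j : Int) then p else getCell a0 i (j : Int)) m k hmlen hkarr
  have hrhs : getCell (setCell out r c p) ↑m ↑k
      = if (↑m : Int) = wrapR arr r ∧ (↑k : Int) = wrapC arr r c then p else getCell out ↑m ↑k := by
    rw [hsetout]
    refine getCell_setCell out (wrapR arr r) (wrapC arr r c) p hwb1 (by rw [houtlen]; exact hwb2)
      hwb3 ?_ ↑m ↑k (by positivity) (by positivity)
    rw [houtrow]
    exact hwb4
  rw [hrhs]
  have hcells := hFcell ↑m ↑k (by positivity) (by positivity)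
  by_cases hw : (↑m : Int) = wrapR arr r ∧ (↑k : Int) = wrapC arr r c
  · rw [if_pos hw]
    by_cases hf : FlipAny a0 (arr.length : Int) p r c
        [((0:Int), (-1:Int)), (0, 1), (-1, 0), (1, 0), (-1, -1), (1, -1), (-1, 1), (1, 1)] ↑m ↑k
    · exact hcells.1 hf
    · rw [hcells.2 hf, hseta0]
      rw [getCell_setCell arr (wrapR arr r) (wrapC arr r c) p hwb1 hwb2 hwb3 hwb4 ↑m ↑k
        (by positivity) (by positivity), if_pos hw]
  · rw [if_neg hw, houtcell]
    by_cases hf : FlipAny a0 (arr.length : Int) p r c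
        [((0:Int), (-1:Int)), (0, 1), (-1, 0), (1, 0), (-1, -1), (1, -1), (-1, 1), (1, 1)] ↑m ↑k
    · rw [hcells.1 hf, if_pos ((captured_iff a0 (arr.length : Int) p r c ↑m ↑k).mpr hf)]
    · rw [hcells.2 hf,
        if_neg (fun hcap => hf ((captured_iff a0 (arr.length : Int) p r c ↑m ↑k).mp hcap))]

-- ===== VERDICT (by name: the statement is the Claim_ definition above) =====
theorem othello_spec : Claim_equal_othello := by
  intro arr r c p _ hpre
  obtain ⟨hrow, hr1, hr2, hc1, hc2⟩ := hpre
  show othello arr r c p = othello_alt arr r c p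
  exact othello_equiv arr r c p hrow hr1 hr2 hc1 hc2
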